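-- pv_equiv track=rewrite | github.com/pypi-data/pypi-mirror-352 | packages/lino-xl/lino_xl-25.6.0-py3-none-any.whl/lino_xl/lib/peppol/suppliers.py | update_id_list
-- ===== SOURCE A (Python) =====
-- def update_id_list(oldlist, value, sep=";"):
--     """
--     Return a list of dicts to send to Ibanity API in order to update
--     the fields :attr:`names` and :attr:`ibans`.
--
--     - `value` is the current Lino value, a string containing one or more names
--       or ibans separated by `sep`.
--
--     - `oldlist` is the list returned by get_supplier()
--
--     Each item of oldlist is a list of `{'id': x, 'value': y }`.
--
--     """
--     newlist = []
--     values = {v.strip() for v in value.split(sep) if v}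
--     for item in oldlist:
--         if (v := item['value']) in values:
--             newlist.append(item)
--             values.remove(v)
--     for v in values:
--         newlist.append({'value': v})
--     newlist.sort(key=lambda x: x['value'])
--     return newlist
-- ===== SOURCE B (Python) =====
-- def update_id_list(oldlist, value, sep=";"):
--     lookup = {}
--     for item in oldlist:
--         lookup.setdefault(item['value'], item)
--     values = {v.strip() for v in value.split(sep) if v}
--     return [lookup[v] if v in lookup else {'value': v} for v in sorted(values)]
-- ===== Notes on version B (the rewrite author's own statement) =====
-- stated objective: idiomatic
-- what changed: B replaces A's scan-over-oldlist-with-set-removal plus append-leftovers plus final sort by building a first-occurrence value-to-item index dict once and emitting the result in one comprehension over sorted(values).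
-- outside the precondition, e.g. on update_id_list([{'id': '1'}], 'A', ';'): A raises KeyError, B raises KeyError; on update_id_list([], 'A', ''): A raises ValueError, B raises ValueError
import Mathlib
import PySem

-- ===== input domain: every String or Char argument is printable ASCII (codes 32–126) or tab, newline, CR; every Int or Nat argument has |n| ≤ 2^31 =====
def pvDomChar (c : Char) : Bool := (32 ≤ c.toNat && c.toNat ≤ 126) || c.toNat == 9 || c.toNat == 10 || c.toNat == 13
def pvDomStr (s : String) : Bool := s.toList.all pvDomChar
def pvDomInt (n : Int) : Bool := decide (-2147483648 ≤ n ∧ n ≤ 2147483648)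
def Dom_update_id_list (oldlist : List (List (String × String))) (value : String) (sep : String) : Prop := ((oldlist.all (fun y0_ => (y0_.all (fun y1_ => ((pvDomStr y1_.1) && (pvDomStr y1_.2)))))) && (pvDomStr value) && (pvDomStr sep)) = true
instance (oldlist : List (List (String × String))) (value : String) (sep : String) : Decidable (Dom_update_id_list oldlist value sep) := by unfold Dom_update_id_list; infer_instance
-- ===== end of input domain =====

-- B replaces A's scan-oldlist-with-set-removal plus final sort by a first-occurrence
-- value→item index and one pass over sorted(values) (objective: idiomatic; same cost).


-- item['value'] (shared lookup shape; exact = Python dict lookup, items have unique keys by Pre_)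
def pvVal (item : List (String × String)) : String :=
  (PySem.Dict.mk item).getD "value" ""

-- {v.strip() for v in value.split(sep) if v}  (exact; sep ≠ "" by Pre_)
def pvValues (value : String) (sep : String) : PySem.Set String :=
  PySem.Set.ofList
    ((((PySem.Str.split? value sep).getD []).filter (fun v => v ≠ "")).map
      (fun v => PySem.Str.strip v))

-- ===== PORT A =====
def update_id_list (oldlist : List (List (String × String))) (value : String) (sep : String) : List (List (String × String)) :=
  let values := pvValues value sep
  -- for item in oldlist: if (v := item['value']) in values: newlist.append(item); values.remove(v)
  let st := oldlist.foldl
    (fun (st : List (List (String × String)) × PySem.Set String) item =>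
      if pvVal item ∈ st.2 then (st.1 ++ [item], (PySem.Set.remove? st.2 (pvVal item)).getD st.2) else st)
    ([], values)
  -- for v in values: newlist.append({'value': v})   (set order; the final distinct-key sort makes the result order-independent)
  let newlist := st.2.foldl (fun nl v => nl ++ [[("value", v)]]) st.1
  -- newlist.sort(key=lambda x: x['value'])
  PySem.List.sorted newlist (fun x => pvVal x) false

-- ===== PORT B =====
def update_id_list_alt (oldlist : List (List (String × String))) (value : String) (sep : String) : List (List (String × String)) :=
  -- lookup.setdefault(item['value'], item)
  let lookup := oldlist.foldl
    (fun (d : PySem.Dict String (List (String × String))) item => d.setdefault (pvVal item) item)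
    PySem.Dict.empty
  let values := pvValues value sep
  -- [lookup[v] if v in lookup else {'value': v} for v in sorted(values)]
  (PySem.List.sorted (values : List String) (fun v => v) false).map
    (fun v => match lookup.get? v with
      | some item => item
      | none => [("value", v)])

-- ===== PRECONDITION & SPEC =====
-- Pre_ excludes sep = "" (A raises ValueError in value.split) and items without a 'value'
-- key (A raises KeyError); items must have distinct keys because the Python items are dicts,
-- which cannot carry a duplicate key at all.
def Pre_update_id_list (oldlist : List (List (String × String))) (value : String) (sep : String) : Prop :=
  sep ≠ "" ∧ ∀ item ∈ oldlist, "value" ∈ item.map Prod.fst ∧ (item.map Prod.fst).Nodup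
instance (oldlist : List (List (String × String))) (value : String) (sep : String) : Decidable (Pre_update_id_list oldlist value sep) := by unfold Pre_update_id_list; infer_instance

def pvWitness_update_id_list : (List (List (String × String))) × String × String :=
  ([[("id", "1"), ("value", "A")], [("id", "2"), ("value", "B")]], "B; C", ";")

def Spec_update_id_list (oldlist : List (List (String × String))) (value : String) (sep : String) (out : List (List (String × String))) : Prop := out = update_id_list_alt oldlist value sep
instance (oldlist : List (List (String × String))) (value : String) (sep : String) (out : List (List (String × String))) : Decidable (Spec_update_id_list oldlist value sep out) := by unfold Spec_update_id_list; infer_instance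

-- ===== CLAIM (what is proved, stated in full; the proofs are below) =====
def Claim_equal_update_id_list : Prop := ∀ (oldlist : List (List (String × String))) (value : String) (sep : String), Dom_update_id_list oldlist value sep → Pre_update_id_list oldlist value sep → Spec_update_id_list oldlist value sep (update_id_list oldlist value sep)

-- ===== LEMMAS AND PROOFS =====

-- '{'value': v}' as produced by both ports
def pvMkv (v : String) : List (String × String) := [("value", v)]

-- the common per-value entry: the first oldlist item with that value, else {'value': v}
def pvEnt (oldlist : List (List (String × String))) (v : String) : List (String × String) :=
  (oldlist.find? (fun it => pvVal it == v)).getD (pvMkv v)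

theorem pvVal_mkv (v : String) : pvVal (pvMkv v) = v := by
  simp [pvVal, pvMkv, PySem.Dict.getD, PySem.Dict.get?]

theorem pvVal_ent (oldlist : List (List (String × String))) (v : String) :
    pvVal (pvEnt oldlist v) = v := by
  unfold pvEnt
  cases h : oldlist.find? (fun it => pvVal it == v) with
  | none => simp [pvVal_mkv]
  | some it =>
      have := List.find?_some h
      simpa using this

-- B's lookup dict answers with the first matching item
theorem lookup_get? (l : List (List (String × String)))
    (d : PySem.Dict String (List (String × String))) (v : String) :
    (l.foldl (fun d item => d.setdefault (pvVal item) item) d).get? v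
      = (d.get? v).or (l.find? (fun it => pvVal it == v)) := by
  induction l generalizing d with
  | nil => simp
  | cons it l ih =>
      simp only [List.foldl_cons, ih]
      by_cases h : pvVal it = v
      · subst h
        rw [PySem.Dict.get?_setdefault_self]
        cases hd : d.get? (pvVal it) <;> simp
      · rw [PySem.Dict.get?_setdefault_of_ne _ _ (fun hvv => h hvv.symm)]
        simp [h]

-- A's first loop as structural recursion
def pvPick : List (List (String × String)) → PySem.Set String →
    List (List (String × String)) × PySem.Set String
  | [], s => ([], s)
  | it :: l, s =>
      if pvVal it ∈ s then
        let r := pvPick l ((PySem.Set.remove? s (pvVal it)).getD s)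
        (it :: r.1, r.2)
      else pvPick l s

theorem foldl_eq_pick (l : List (List (String × String)))
    (acc : List (List (String × String))) (s : PySem.Set String) :
    l.foldl
      (fun (st : List (List (String × String)) × PySem.Set String) item =>
        if pvVal item ∈ st.2 then (st.1 ++ [item], (PySem.Set.remove? st.2 (pvVal item)).getD st.2) else st)
      (acc, s)
      = (acc ++ (pvPick l s).1, (pvPick l s).2) := by
  induction l generalizing acc s with
  | nil => simp [pvPick]
  | cons it l ih =>
      by_cases h : pvVal it ∈ s
      · simp only [List.foldl_cons, pvPick, if_pos h, ih]
        simp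
      · simp only [List.foldl_cons, pvPick, if_neg h, ih]

theorem remove_getD_of_mem (s : PySem.Set String) (v : String) (h : v ∈ s) :
    (PySem.Set.remove? s v).getD s = PySem.Set.discard s v := by
  rw [PySem.Set.remove?_of_mem h]
  rfl

-- map over a Nodup set: pulling one member to the front
theorem map_perm_cons_discard (f : String → List (String × String))
    (s : PySem.Set String) (v : String) (hv : v ∈ s) (hnd : s.Nodup) :
    (s.map f).Perm (f v :: (PySem.Set.discard s v).map f) := by
  obtain ⟨s₁, s₂, rfl⟩ := List.append_of_mem hv
  obtain ⟨hs₁, hvs₂, hdisj⟩ := List.nodup_append.mp hnd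
  have hnd₁ : v ∉ s₁ := fun hx => (hdisj v hx v List.mem_cons_self) rfl
  have hnd₂ : v ∉ s₂ := (List.nodup_cons.mp hvs₂).1
  have hdisc : PySem.Set.discard (s₁ ++ v :: s₂) v = s₁ ++ s₂ := by
    simp only [PySem.Set.discard, List.filter_append, List.filter_cons]
    have e₁ : s₁.filter (fun y => !y == v) = s₁ :=
      List.filter_eq_self.mpr (fun a ha => by
        simp only [ne_eq, Bool.not_eq_eq_eq_not, Bool.not_true, beq_eq_false_iff_ne]
        exact fun hEq => hnd₁ (hEq ▸ ha))
    have e₂ : s₂.filter (fun y => !y == v) = s₂ :=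
      List.filter_eq_self.mpr (fun a ha => by
        simp only [ne_eq, Bool.not_eq_eq_eq_not, Bool.not_true, beq_eq_false_iff_ne]
        exact fun hEq => hnd₂ (hEq ▸ ha))
    simp [e₁, e₂]
  rw [hdisc]
  simp only [List.map_append, List.map_cons]
  exact List.perm_middle

-- character of A's first loop: what it appended plus what is left, as a bag
theorem pick_perm (l : List (List (String × String))) (s : PySem.Set String)
    (hnd : s.Nodup) :
    ((pvPick l s).1 ++ (pvPick l s).2.map pvMkv).Perm (s.map (pvEnt l)) := by
  induction l generalizing s with
  | nil =>
      simp only [pvPick]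
      have hmap : s.map (pvEnt []) = s.map pvMkv :=
        List.map_congr_left (fun v _ => by simp [pvEnt])
      rw [hmap]
      simp
  | cons it l ih =>
      by_cases h : pvVal it ∈ s
      · simp only [pvPick, if_pos h, remove_getD_of_mem s _ h]
        have hnd' : (PySem.Set.discard s (pvVal it)).Nodup := List.Nodup.filter _ hnd
        have step := ih (PySem.Set.discard s (pvVal it)) hnd'
        have hEq : (PySem.Set.discard s (pvVal it)).map (pvEnt l)
            = (PySem.Set.discard s (pvVal it)).map (pvEnt (it :: l)) := by
          apply List.map_congr_left
          intro v hv
          have hne : v ≠ pvVal it := ((PySem.Set.mem_discard _ _ _).mp hv).2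
          simp [pvEnt, beq_iff_eq, hne.symm]
        have hfront : pvEnt (it :: l) (pvVal it) = it := by
          simp [pvEnt]
        have step' : ((it :: (pvPick l (PySem.Set.discard s (pvVal it))).1)
            ++ (pvPick l (PySem.Set.discard s (pvVal it))).2.map pvMkv).Perm
            (it :: ((PySem.Set.discard s (pvVal it)).map (pvEnt (it :: l)))) := by
          rw [← hEq]
          simpa using step.cons it
        have hm := (map_perm_cons_discard (pvEnt (it :: l)) s (pvVal it) h hnd).symm
        rw [hfront] at hm
        exact step'.trans hm
      · simp only [pvPick, if_neg h]
        have hEq : s.map (pvEnt l) = s.map (pvEnt (it :: l)) := by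
          apply List.map_congr_left
          intro v hv
          have hne : pvVal it ≠ v := fun hvv => h (hvv ▸ hv)
          simp [pvEnt, beq_iff_eq, hne]
        exact (ih s hnd).trans (hEq ▸ List.Perm.refl _)

theorem values_nodup (value sep : String) : (pvValues value sep).Nodup :=
  PySem.Set.nodup_ofList _

-- B's result, rewritten through pvEnt
theorem alt_eq_map_ent (oldlist : List (List (String × String))) (value sep : String) :
    update_id_list_alt oldlist value sep
      = (PySem.List.sorted (pvValues value sep : List String) (fun v => v) false).map
          (pvEnt oldlist) := by
  unfold update_id_list_alt
  apply List.map_congr_left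
  intro v _
  rw [show (oldlist.foldl
      (fun (d : PySem.Dict String (List (String × String))) item => d.setdefault (pvVal item) item)
      PySem.Dict.empty).get? v
      = (PySem.Dict.empty.get? v).or (oldlist.find? (fun it => pvVal it == v)) from
        lookup_get? oldlist PySem.Dict.empty v]
  simp only [PySem.Dict.get?_empty, Option.none_or]
  unfold pvEnt
  cases oldlist.find? (fun it => pvVal it == v) <;> rfl

-- ===== VERDICT (by name: the statement is the Claim_ definition above) =====
theorem update_id_list_spec : Claim_equal_update_id_list := by
  unfold Claim_equal_update_id_list
  intro oldlist value sep _ _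
  unfold Spec_update_id_list
  unfold update_id_list
  simp only [foldl_eq_pick, List.nil_append, PySem.List.foldl_append_singleton_eq_map]
  rw [alt_eq_map_ent]
  set V := pvValues value sep with hV
  have hVnd : V.Nodup := values_nodup value sep
  have hperm1 : ((pvPick oldlist V).1 ++ (pvPick oldlist V).2.map pvMkv).Perm (V.map (pvEnt oldlist)) :=
    pick_perm oldlist V hVnd
  have hperm2 : ((PySem.List.sorted (V : List String) (fun v => v) false).map (pvEnt oldlist)).Perm
      (V.map (pvEnt oldlist)) :=
    (PySem.List.sorted_perm (V : List String) (fun v => v) false).map _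
  have hperm : ((PySem.List.sorted (V : List String) (fun v => v) false).map (pvEnt oldlist)).Perm
      ((pvPick oldlist V).1 ++ (pvPick oldlist V).2.map pvMkv) :=
    hperm2.trans hperm1.symm
  have hsortednd : (PySem.List.sorted (V : List String) (fun v => v) false).Nodup :=
    (PySem.List.sorted_perm (V : List String) (fun v => v) false).nodup_iff.mpr hVnd
  have hle : List.Pairwise (fun a b : String => a ≤ b)
      (PySem.List.sorted (V : List String) (fun v => v) false) :=
    PySem.List.sorted_pairwise (V : List String) (fun v => v)
  have hlt : List.Pairwise (fun a b : String => a < b)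
      (PySem.List.sorted (V : List String) (fun v => v) false) :=
    (hle.and hsortednd).imp (fun h => lt_of_le_of_ne h.1 h.2)
  have hpw : List.Pairwise (fun a b => pvVal a < pvVal b)
      ((PySem.List.sorted (V : List String) (fun v => v) false).map (pvEnt oldlist)) := by
    rw [List.pairwise_map]
    exact hlt.imp_of_mem (fun {a b} ha hb hab => by
      rw [pvVal_ent, pvVal_ent]; exact hab)
  exact PySem.List.sorted_eq_of_perm_of_pairwise_lt _ _ _ hperm hpw
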